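-- pv_equiv track=rewrite | github.com/tete1030/my-skills | opencode/scripts/opencode_validate_live.py | redact_argv
-- ===== SOURCE A (Python) =====
-- def redact_argv(argv: list[str]) -> list[str]:
--     redacted: list[str] = []
--     redact_next = False
--     for item in argv:
--         if redact_next:
--             redacted.append("<redacted>")
--             redact_next = False
--             continue
--         redacted.append(item)
--         if item == "--opencode-token":
--             redact_next = True
--     return redacted
-- ===== SOURCE B (Python) =====
-- def redact_argv(argv: list[str]) -> list[str]:
--     out: list[str] = []
--     rest = argv
--     while True:
--         try:
--             k = rest.index("--opencode-token")
--         except ValueError: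
--             out.extend(rest)
--             return out
--         out.extend(rest[:k + 1])
--         if k + 1 < len(rest):
--             out.append("<redacted>")
--         rest = rest[k + 2:]
-- ===== Notes on version B (the rewrite author's own statement) =====
-- stated objective: alternative
-- what changed: Replaces the element-by-element state-machine scan with a find-and-splice loop: repeatedly locate the first '--opencode-token' with list.index, copy the entire preceding slice plus the flag in one splice, append '<redacted>' if a value slot exists, and continue after the consumed pair.
import Mathlib
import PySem

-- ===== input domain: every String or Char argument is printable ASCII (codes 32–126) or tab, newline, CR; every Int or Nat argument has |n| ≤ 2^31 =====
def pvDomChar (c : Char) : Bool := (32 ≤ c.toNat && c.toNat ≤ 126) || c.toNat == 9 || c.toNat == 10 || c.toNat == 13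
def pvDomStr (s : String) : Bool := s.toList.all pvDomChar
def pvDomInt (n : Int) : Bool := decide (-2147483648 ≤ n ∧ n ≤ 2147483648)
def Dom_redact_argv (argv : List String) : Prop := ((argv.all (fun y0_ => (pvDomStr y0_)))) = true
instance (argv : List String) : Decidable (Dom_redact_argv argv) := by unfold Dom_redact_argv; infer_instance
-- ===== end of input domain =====

-- B replaces A's element-by-element redact_next state machine with a find-and-splice
-- loop: locate the first "--opencode-token" with list.index, splice the whole slice up
-- to and including it, redact the value slot, continue after the pair ("alternative").

-- ===== PORT A =====
-- A's for-loop carries the state (redacted, redact_next); branches in A's order.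
def redactA_go (xs : List String) (redact_next : Bool) : List String :=
  match xs, redact_next with
  | [], _ => []
  | _ :: rest, true => "<redacted>" :: redactA_go rest false
  | item :: rest, false =>
      item :: redactA_go rest (item == "--opencode-token")

def redact_argv (argv : List String) : List String := redactA_go argv false

-- ===== PORT B =====
-- B's while loop: rest.index("--opencode-token") via PySem.List.index? (ValueError = none);
-- the slices rest[:k+1] and rest[k+2:] have nonnegative in-range bounds, where Python's
-- slice is exactly List.take / List.drop.
def redactB_go (rest : List String) : List String :=
  match h : PySem.List.index? rest "--opencode-token" with
  | none => rest
  | some k =>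
      rest.take (k + 1) ++
        ((if k + 1 < rest.length then ["<redacted>"] else []) ++ redactB_go (rest.drop (k + 2)))
termination_by rest.length
decreasing_by
  have hm : "--opencode-token" ∈ rest :=
    (PySem.List.index?_isSome_iff (xs := rest) (v := "--opencode-token")).1 (by rw [h]; rfl)
  have : 0 < rest.length := List.length_pos_of_mem hm
  simp [List.length_drop]; omega

def redact_argv_alt (argv : List String) : List String := redactB_go argv

-- ===== PRECONDITION & SPEC =====
def Spec_redact_argv (argv : List String) (out : List String) : Prop := out = redact_argv_alt argv
instance (argv : List String) (out : List String) : Decidable (Spec_redact_argv argv out) := by unfold Spec_redact_argv; infer_instance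

-- ===== CLAIM (what is proved, stated in full; the proofs are below) =====
def Claim_equal_redact_argv : Prop := ∀ (argv : List String), Dom_redact_argv argv → Spec_redact_argv argv (redact_argv argv)

-- ===== LEMMAS AND PROOFS =====
theorem redactA_no_flag (xs : List String) (h : "--opencode-token" ∉ xs) :
    redactA_go xs false = xs := by
  induction xs with
  | nil => rfl
  | cons x rest ih =>
      have hx : (x == "--opencode-token") = false := by
        simp; exact fun hc => h (hc ▸ List.mem_cons_self)
      simp [redactA_go, hx, ih (fun hm => h (List.mem_cons_of_mem _ hm))]

theorem redactA_append (pre ys : List String) (h : "--opencode-token" ∉ pre) :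
    redactA_go (pre ++ ys) false = pre ++ redactA_go ys false := by
  induction pre with
  | nil => rfl
  | cons x rest ih =>
      have hx : (x == "--opencode-token") = false := by
        simp; exact fun hc => h (hc ▸ List.mem_cons_self)
      simp [redactA_go, hx, ih (fun hm => h (List.mem_cons_of_mem _ hm))]

theorem redactA_eq_redactB (rest : List String) : redactA_go rest false = redactB_go rest := by
  induction rest using redactB_go.induct with
  | case1 rest h =>
      rw [redactB_go, h]
      exact redactA_no_flag rest
        ((PySem.List.index?_eq_none_iff (xs := rest) (v := "--opencode-token")).1 h)
  | case2 rest k h ih =>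
      rw [redactB_go, h]
      dsimp only
      obtain ⟨pre, suf, hsplit, hlen, hnm⟩ :=
        (PySem.List.index?_eq_some_iff (xs := rest) (v := "--opencode-token") (k := k)).1 h
      subst hsplit
      subst hlen
      have htake : (pre ++ "--opencode-token" :: suf).take (pre.length + 1)
          = pre ++ ["--opencode-token"] := by
        rw [List.take_append, List.take_of_length_le (by omega)]
        simp
      have hdrop : (pre ++ "--opencode-token" :: suf).drop (pre.length + 2) = suf.drop 1 := by
        rw [List.drop_append, List.drop_of_length_le (by omega)]
        simp [List.drop_succ_cons]
      rw [redactA_append pre _ hnm, htake, hdrop]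
      rw [hdrop] at ih
      cases suf with
      | nil =>
          have hcond : ¬ (pre.length + 1 < (pre ++ ["--opencode-token"]).length) := by
            simp
          simp only [List.drop_nil] at ih
          simp [redactA_go, hcond, ← ih]
      | cons y t =>
          have hcond : pre.length + 1 < (pre ++ "--opencode-token" :: y :: t).length := by
            simp
          simp only [List.drop_succ_cons, List.drop_zero] at ih
          simp [redactA_go, hcond, ← ih]

-- ===== VERDICT (by name: the statement is the Claim_ definition above) =====
theorem redact_argv_spec : Claim_equal_redact_argv := by
  intro argv _
  unfold Spec_redact_argv redact_argv redact_argv_alt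
  exact redactA_eq_redactB argv
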